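-- pv_equiv track=rewrite | github.com/chostasa/legal_automation_hub_v3 | scripts/run_mediation.py | merge_multiline_qas
-- ===== SOURCE A (Python) =====
-- def merge_multiline_qas(numbered_lines):
--     """
--     Rebuilds full Q/A blocks including multi-line content.
--     Returns a string of the cleaned transcript.
--     """
--     qa_blocks = []
--     buffer = []
--     current_type = None
--
--     for id_line, content in numbered_lines:
--         if content.startswith("Q:"):
--             if buffer:
--                 qa_blocks.append("\n".join(buffer))
--                 buffer = []
--             current_type = "Q"
--             buffer.append(f"{id_line} {content}")
--         elif content.startswith("A:"):
--             if buffer: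
--                 qa_blocks.append("\n".join(buffer))
--                 buffer = []
--             current_type = "A"
--             buffer.append(f"{id_line} {content}")
--         elif current_type in {"Q", "A"}:
--             buffer.append(f"{id_line} {content}")
--
--     if buffer:
--         qa_blocks.append("\n".join(buffer))
--
--     return "\n".join(qa_blocks)
-- ===== SOURCE B (Python) =====
-- def merge_multiline_qas(numbered_lines):
--     """
--     Rebuilds full Q/A blocks including multi-line content.
--     Returns a string of the cleaned transcript.
--
--     Different decomposition: find the first Q:/A: marker, then format and join
--     the whole tail in one expression (every line after the first marker is kept,
--     and blocks are re-joined with the same separator as lines within a block).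
--     """
--     start = next((i for i, (_, content) in enumerate(numbered_lines)
--                   if content.startswith("Q:") or content.startswith("A:")), None)
--     if start is None:
--         return ""
--     return "\n".join(f"{id_line} {content}" for id_line, content in numbered_lines[start:])
-- ===== Notes on version B (the rewrite author's own statement) =====
-- stated objective: simpler
-- what changed: B removes A's block buffering and state machine entirely: it locates the index of the first 'Q:'/'A:' marker and joins the formatted tail in a single pass, using the fact that once a marker is seen every subsequent line is kept and blocks are rejoined with the same '\n' separator as lines inside a block.
import Mathlib
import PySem

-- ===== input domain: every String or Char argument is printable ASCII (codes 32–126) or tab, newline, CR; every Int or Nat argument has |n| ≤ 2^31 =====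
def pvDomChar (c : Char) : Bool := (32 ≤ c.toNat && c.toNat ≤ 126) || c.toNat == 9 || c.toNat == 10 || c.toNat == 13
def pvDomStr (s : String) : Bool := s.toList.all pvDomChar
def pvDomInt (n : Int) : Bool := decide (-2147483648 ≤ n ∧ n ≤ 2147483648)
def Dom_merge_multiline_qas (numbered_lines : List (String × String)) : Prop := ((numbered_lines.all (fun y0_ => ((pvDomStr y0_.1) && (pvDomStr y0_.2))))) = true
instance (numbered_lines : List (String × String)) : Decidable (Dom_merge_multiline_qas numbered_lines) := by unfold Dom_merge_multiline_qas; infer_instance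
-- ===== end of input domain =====

-- B removes A's buffer/state machine: it finds the first 'Q:'/'A:' marker and joins the
-- formatted tail in one expression (simpler; same O(n) cost).


-- ===== PORT A =====
-- f"{id_line} {content}"
def pvFmt (p : String × String) : String := p.1 ++ " " ++ p.2

-- the body of A's for-loop; state = (qa_blocks, buffer, current_type)
def pvStepA (st : List String × List String × Option String) (p : String × String) :
    List String × List String × Option String :=
  if PySem.Str.startswith p.2 "Q:" then
    ((if st.2.1.isEmpty then st.1 else st.1 ++ [PySem.Str.join "\n" st.2.1]), [pvFmt p], some "Q")
  else if PySem.Str.startswith p.2 "A:" then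
    ((if st.2.1.isEmpty then st.1 else st.1 ++ [PySem.Str.join "\n" st.2.1]), [pvFmt p], some "A")
  else if st.2.2 = some "Q" ∨ st.2.2 = some "A" then
    (st.1, st.2.1 ++ [pvFmt p], st.2.2)
  else st

def merge_multiline_qas (numbered_lines : List (String × String)) : String :=
  let st := numbered_lines.foldl pvStepA ([], [], none)
  PySem.Str.join "\n" (if st.2.1.isEmpty then st.1 else st.1 ++ [PySem.Str.join "\n" st.2.1])

-- ===== PORT B =====
-- content.startswith("Q:") or content.startswith("A:")
def pvIsMarker (p : String × String) : Bool :=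
  PySem.Str.startswith p.2 "Q:" || PySem.Str.startswith p.2 "A:"

def merge_multiline_qas_alt (numbered_lines : List (String × String)) : String :=
  match numbered_lines.findIdx? pvIsMarker with
  | none => ""
  | some i =>
      PySem.Str.join "\n" ((PySem.List.slice numbered_lines (some (i : Int)) none).map pvFmt)

-- ===== PRECONDITION & SPEC =====
def Spec_merge_multiline_qas (numbered_lines : List (String × String)) (out : String) : Prop := out = merge_multiline_qas_alt numbered_lines
instance (numbered_lines : List (String × String)) (out : String) : Decidable (Spec_merge_multiline_qas numbered_lines out) := by unfold Spec_merge_multiline_qas; infer_instance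

-- ===== CLAIM (what is proved, stated in full; the proofs are below) =====
def Claim_equal_merge_multiline_qas : Prop := ∀ (numbered_lines : List (String × String)), Dom_merge_multiline_qas numbered_lines → Spec_merge_multiline_qas numbered_lines (merge_multiline_qas numbered_lines)

-- ===== LEMMAS AND PROOFS =====
theorem sj_nil (s : String) : PySem.Str.join s [] = "" := by
  apply String.toList_inj.mp
  simp [PySem.Str.toList_join, PySem.Chars.join_nil]

theorem sj_singleton (s x : String) : PySem.Str.join s [x] = x := by
  apply String.toList_inj.mp
  simp [PySem.Str.toList_join, PySem.Chars.join_singleton]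

theorem sj_cons_ne (s z : String) (T : List String) (hT : T ≠ []) :
    PySem.Str.join s (z :: T) = z ++ s ++ PySem.Str.join s T := by
  obtain ⟨t, T', rfl⟩ := List.exists_cons_of_ne_nil hT
  apply String.toList_inj.mp
  simp [PySem.Str.toList_join, PySem.Chars.join_cons_cons, String.toList_append]

theorem sj_append (s : String) (buf : List String) (f : String) (M : List String)
    (hb : buf ≠ []) :
    PySem.Str.join s (buf ++ f :: M) = PySem.Str.join s buf ++ s ++ PySem.Str.join s (f :: M) := by
  induction buf with
  | nil => exact absurd rfl hb
  | cons x buf ih =>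
    cases buf with
    | nil => simp [sj_cons_ne s x (f :: M) (by simp), sj_singleton]
    | cons y buf' =>
      rw [List.cons_append, sj_cons_ne s x ((y :: buf') ++ f :: M) (by simp),
          ih (by simp), sj_cons_ne s x (y :: buf') (by simp)]
      simp [String.append_assoc]

theorem sj_mid (s : String) (L : List String) (x y : String) :
    PySem.Str.join s (L ++ [x, y]) = PySem.Str.join s (L ++ [x ++ s ++ y]) := by
  induction L with
  | nil => simp [sj_cons_ne s x [y] (by simp), sj_singleton]
  | cons z L ih =>
    rw [List.cons_append, List.cons_append,
        sj_cons_ne s z (L ++ [x, y]) (by simp),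
        sj_cons_ne s z (L ++ [x ++ s ++ y]) (by simp), ih]

-- after the first marker: the fold just appends every formatted line, flushing
-- buffers at markers; the final joined string is join of blocks ++ one block of the rest
theorem pvAfter (rest : List (String × String)) :
    ∀ (blocks buf : List String) (t : Option String),
    (t = some "Q" ∨ t = some "A") → buf ≠ [] →
    (let st := rest.foldl pvStepA (blocks, buf, t)
     PySem.Str.join "\n" (if st.2.1.isEmpty then st.1 else st.1 ++ [PySem.Str.join "\n" st.2.1]))
    = PySem.Str.join "\n" (blocks ++ [PySem.Str.join "\n" (buf ++ rest.map pvFmt)]) := by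
  induction rest with
  | nil =>
    intro blocks buf t ht hb
    simp [List.isEmpty_eq_false_iff.mpr hb]
  | cons p rest ih =>
    intro blocks buf t ht hb
    by_cases hq : PySem.Str.startswith p.2 "Q:" = true
    · have := ih (blocks ++ [PySem.Str.join "\n" buf]) [pvFmt p] (some "Q") (Or.inl rfl) (by simp)
      simp only [List.foldl_cons, pvStepA, hq, if_pos, List.isEmpty_eq_false_iff.mpr hb,
        Bool.false_eq_true, ite_false] at this ⊢
      rw [this, List.map_cons, sj_append "\n" buf (pvFmt p) (rest.map pvFmt) hb,
          List.append_assoc blocks, ← sj_mid]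
      simp
    · by_cases ha : PySem.Str.startswith p.2 "A:" = true
      · have := ih (blocks ++ [PySem.Str.join "\n" buf]) [pvFmt p] (some "A") (Or.inr rfl) (by simp)
        simp only [List.foldl_cons, pvStepA, hq, ha, if_pos, List.isEmpty_eq_false_iff.mpr hb,
          Bool.false_eq_true, ite_false] at this ⊢
        rw [this, List.map_cons, sj_append "\n" buf (pvFmt p) (rest.map pvFmt) hb,
            List.append_assoc blocks, ← sj_mid]
        simp
      · have := ih blocks (buf ++ [pvFmt p]) t ht (by simp)
        simp only [List.foldl_cons, pvStepA, hq, ha, ht, if_pos,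
          Bool.false_eq_true, ite_false] at this ⊢
        rw [this, List.map_cons]
        simp [List.append_assoc]

-- ===== VERDICT (by name: the statement is the Claim_ definition above) =====
theorem pvMain (numbered_lines : List (String × String)) :
    merge_multiline_qas numbered_lines = merge_multiline_qas_alt numbered_lines := by
  induction numbered_lines with
  | nil => simp [merge_multiline_qas, merge_multiline_qas_alt, sj_nil]
  | cons p rest ih =>
    by_cases hm : pvIsMarker p = true
    · -- first marker at the head
      have hstep : pvStepA ([], [], none) p = ([], [pvFmt p],
          some (if PySem.Str.startswith p.2 "Q:" then "Q" else "A")) := by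
        unfold pvIsMarker at hm
        unfold pvStepA
        simp only [PySem.Str.startswith_eq, show ("Q:").toList = ['Q',':'] from rfl,
          show ("A:").toList = ['A',':'] from rfl] at hm ⊢
        rcases Bool.or_eq_true_iff.mp hm with h | h
        · simp [h]
        · by_cases h2 : PySem.Chars.startswith p.2.toList ['Q',':'] = true
          · simp [h2]
          · simp [h, h2]
      have hA := pvAfter rest [] [pvFmt p]
          (some (if PySem.Str.startswith p.2 "Q:" then "Q" else "A"))
          (by split <;> simp) (by simp)
      rw [merge_multiline_qas, List.foldl_cons, hstep]
      simp only at hA ⊢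
      rw [hA]
      rw [merge_multiline_qas_alt]
      rw [List.findIdx?_cons, if_pos hm]
      simp [sj_singleton]
    · -- head is not a marker: A's state is unchanged, B skips it
      have hq : PySem.Str.startswith p.2 "Q:" = false := by
        revert hm; unfold pvIsMarker; cases PySem.Str.startswith p.2 "Q:" <;> simp
      have ha : PySem.Str.startswith p.2 "A:" = false := by
        revert hm; unfold pvIsMarker; cases PySem.Str.startswith p.2 "A:" <;> simp
      have hstep : pvStepA ([], [], none) p = ([], [], none) := by
        unfold pvStepA
        simp only [PySem.Str.startswith_eq, show ("Q:").toList = ['Q',':'] from rfl,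
          show ("A:").toList = ['A',':'] from rfl] at hq ha ⊢
        simp [hq, ha]
      rw [merge_multiline_qas, List.foldl_cons, hstep]
      rw [show (let st := rest.foldl pvStepA ([], [], none);
            PySem.Str.join "\n" (if st.2.1.isEmpty then st.1 else st.1 ++ [PySem.Str.join "\n" st.2.1]))
          = merge_multiline_qas rest from rfl]
      rw [ih]
      rw [merge_multiline_qas_alt, merge_multiline_qas_alt]
      rw [List.findIdx?_cons, if_neg (by simp [hm])]
      cases hfi : rest.findIdx? pvIsMarker with
      | none => simp
      | some i =>
        simp only [Option.map_some]
        rw [PySem.List.slice_from (p :: rest) (a := (((i+1) : Nat) : Int)) (by omega),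
            PySem.List.slice_from rest (a := ((i : Nat) : Int)) (by omega)]
        simp

theorem merge_multiline_qas_spec : Claim_equal_merge_multiline_qas := by
  intro numbered_lines _
  exact pvMain numbered_lines
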